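-- pv_equiv track=rewrite | github.com/pypi-data/pypi-mirror-398 | packages/passfx/passfx-1.0.3-py3-none-any.whl/passfx/search/engine.py | _all_tokens_match
-- ===== SOURCE A (Python) =====
-- def _all_tokens_match(query_tokens: list[str], entry_tokens: list[str]) -> bool:
--     """Check if all query tokens match entry tokens.
--
--     Each query token must be a prefix of at least one entry token.
--
--     Args:
--         query_tokens: Tokenized query.
--         entry_tokens: Tokenized entry value.
--
--     Returns:
--         True if all query tokens match.
--     """
--     for qt in query_tokens:
--         found = False
--         for et in entry_tokens:
--             if et.startswith(qt):
--                 found = True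
--                 break
--         if not found:
--             return False
--     return True
-- ===== SOURCE B (Python) =====
-- def _all_tokens_match(query_tokens: list[str], entry_tokens: list[str]) -> bool:
--     """Build the set of all prefixes of the entry tokens once, then answer each
--     query token with one O(1) set lookup instead of scanning every entry token."""
--     prefixes = set()
--     for et in entry_tokens:
--         for k in range(len(et) + 1):
--             prefixes.add(et[:k])
--     return all(qt in prefixes for qt in query_tokens)
-- ===== Notes on version B (the rewrite author's own statement) =====
-- stated objective: alternative
-- what changed: Instead of scanning the entry tokens with startswith for every query token, B builds a hash set of all prefixes of the entry tokens once and answers each query token by a single set-membership lookup.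
import Mathlib
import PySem

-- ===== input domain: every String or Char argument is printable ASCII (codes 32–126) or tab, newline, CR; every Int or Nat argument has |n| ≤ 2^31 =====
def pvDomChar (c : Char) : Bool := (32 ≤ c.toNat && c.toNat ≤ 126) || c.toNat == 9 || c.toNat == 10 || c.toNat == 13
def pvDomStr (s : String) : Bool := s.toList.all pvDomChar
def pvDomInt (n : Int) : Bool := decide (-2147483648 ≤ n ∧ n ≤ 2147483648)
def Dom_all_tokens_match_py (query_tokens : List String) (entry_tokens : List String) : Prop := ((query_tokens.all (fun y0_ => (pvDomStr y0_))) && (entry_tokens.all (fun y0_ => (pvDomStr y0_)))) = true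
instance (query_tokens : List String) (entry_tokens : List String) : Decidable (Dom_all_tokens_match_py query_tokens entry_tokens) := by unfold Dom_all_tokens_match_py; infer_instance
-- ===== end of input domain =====

-- B replaces the per-query startswith scan of the entry tokens by one precomputed set of all entry-token prefixes, answered by membership lookups (alternative algorithm, same result).

-- ===== PORT A =====
-- inner loop: 'found = False; for et in entry_tokens: if et.startswith(qt): found = True; break'
def pvFoundA (qt : String) : List String → Bool
  | [] => false
  | et :: rest => if PySem.Str.startswith et qt then true else pvFoundA qt rest

def all_tokens_match_py (query_tokens : List String) (entry_tokens : List String) : Bool :=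
  match query_tokens with
  | [] => true
  | qt :: rest =>
    if !(pvFoundA qt entry_tokens) then false
    else all_tokens_match_py rest entry_tokens

-- ===== PORT B =====
def all_tokens_match_py_alt (query_tokens : List String) (entry_tokens : List String) : Bool :=
  let prefixes : PySem.Set String :=
    entry_tokens.foldl (fun s et =>
      (PySem.List.pyRange 0 (PySem.Str.len et + 1) 1).foldl
        (fun s k => PySem.Set.add s (PySem.Str.slice et none (some k))) s)
      PySem.Set.empty
  query_tokens.all (fun qt => PySem.Set.contains prefixes qt)

-- ===== PRECONDITION & SPEC =====
def Spec_all_tokens_match_py (query_tokens : List String) (entry_tokens : List String) (out : Bool) : Prop := out = all_tokens_match_py_alt query_tokens entry_tokens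
instance (query_tokens : List String) (entry_tokens : List String) (out : Bool) : Decidable (Spec_all_tokens_match_py query_tokens entry_tokens out) := by unfold Spec_all_tokens_match_py; infer_instance

-- ===== CLAIM (what is proved, stated in full; the proofs are below) =====
def Claim_equal_all_tokens_match_py : Prop := ∀ (query_tokens : List String) (entry_tokens : List String), Dom_all_tokens_match_py query_tokens entry_tokens → Spec_all_tokens_match_py query_tokens entry_tokens (all_tokens_match_py query_tokens entry_tokens)

-- ===== LEMMAS AND PROOFS =====

-- generic: membership after folding 'add (f k)' over a list
theorem mem_foldl_add {α β : Type} [BEq α] [LawfulBEq α] (l : List β) (f : β → α)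
    (s : PySem.Set α) (x : α) :
    (x ∈ l.foldl (fun s k => PySem.Set.add s (f k)) s) ↔ x ∈ s ∨ ∃ k ∈ l, x = f k := by
  induction l generalizing s with
  | nil => simp
  | cons b bs ih =>
    simp only [List.foldl_cons, ih, PySem.Set.mem_add]
    constructor
    · rintro (⟨h | h⟩ | ⟨k, hk, rfl⟩)
      · exact Or.inl h
      · exact Or.inr ⟨b, by simp, h⟩
      · exact Or.inr ⟨k, by simp [hk], rfl⟩
    · rintro (h | ⟨k, hk, rfl⟩)
      · exact Or.inl (Or.inl h)
      · rcases List.mem_cons.mp hk with rfl | hk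
        · exact Or.inl (Or.inr rfl)
        · exact Or.inr ⟨k, hk, rfl⟩

-- the inner loop adds exactly the prefixes of et
theorem mem_inner_fold (et : String) (s : PySem.Set String) (x : String) :
    (x ∈ (PySem.List.pyRange 0 (PySem.Str.len et + 1) 1).foldl
        (fun s k => PySem.Set.add s (PySem.Str.slice et none (some k))) s) ↔
      x ∈ s ∨ x.toList <+: et.toList := by
  rw [mem_foldl_add]
  apply or_congr Iff.rfl
  constructor
  · rintro ⟨k, hk, rfl⟩
    rw [PySem.List.mem_pyRange_one] at hk
    obtain ⟨h0, _⟩ := hk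
    obtain ⟨n, rfl⟩ := Int.eq_ofNat_of_zero_le h0
    refine ⟨et.toList.drop n, ?_⟩
    have h : (PySem.Str.slice et none (some (n : Int))).toList = et.toList.take n := by
      simp [PySem.Str.toList_slice, PySem.List.slice_to_natCast]
    simp [h]
  · intro hpre
    refine ⟨(x.toList.length : Int), ?_, ?_⟩
    · rw [PySem.List.mem_pyRange_one]
      have h1 := hpre.length_le
      have h2 : et.toList.length = et.length := String.length_toList
      have h3 : x.toList.length = x.length := String.length_toList
      simp only [PySem.Str.len_eq]
      omega
    · have hx : x.toList = et.toList.take x.toList.length :=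
        List.prefix_iff_eq_take.mp hpre
      apply String.toList_inj.mp
      simp [PySem.Str.toList_slice, PySem.List.slice_to_natCast]
      exact hx

-- the whole set built by B holds exactly the prefixes of the entry tokens
theorem mem_prefixes_fold (e : List String) (s : PySem.Set String) (x : String) :
    (x ∈ e.foldl (fun s et =>
        (PySem.List.pyRange 0 (PySem.Str.len et + 1) 1).foldl
          (fun s k => PySem.Set.add s (PySem.Str.slice et none (some k))) s) s) ↔
      x ∈ s ∨ ∃ et ∈ e, x.toList <+: et.toList := by
  induction e generalizing s with
  | nil => simp
  | cons et rest ih =>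
    simp only [List.foldl_cons, ih, mem_inner_fold]
    constructor
    · rintro (⟨h | h⟩ | ⟨k, hk, hp⟩)
      · exact Or.inl h
      · exact Or.inr ⟨et, by simp, h⟩
      · exact Or.inr ⟨k, by simp [hk], hp⟩
    · rintro (h | ⟨k, hk, hp⟩)
      · exact Or.inl (Or.inl h)
      · rcases List.mem_cons.mp hk with rfl | hk
        · exact Or.inl (Or.inr hp)
        · exact Or.inr ⟨k, hk, hp⟩

-- A's inner loop as an existence statement
theorem startswith_true_iff (s p : String) :
    PySem.Str.startswith s p = true ↔ p.toList <+: s.toList := by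
  rw [PySem.Str.startswith_eq]
  exact PySem.Chars.startswith_iff _ _

theorem pvFoundA_iff (qt : String) (e : List String) :
    pvFoundA qt e = true ↔ ∃ et ∈ e, qt.toList <+: et.toList := by
  induction e with
  | nil => simp [pvFoundA]
  | cons et rest ih =>
    simp only [pvFoundA]
    split_ifs with h
    · simp only [true_iff]
      exact ⟨et, List.mem_cons_self, (startswith_true_iff et qt).mp h⟩
    · rw [ih]
      constructor
      · rintro ⟨k, hk, hp⟩
        exact ⟨k, List.mem_cons_of_mem _ hk, hp⟩
      · rintro ⟨k, hk, hp⟩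
        rcases List.mem_cons.mp hk with rfl | hk
        · exact absurd ((startswith_true_iff k qt).mpr hp) h
        · exact ⟨k, hk, hp⟩

-- A's outer loop is List.all of the inner loop
theorem all_tokens_match_py_eq_all (q e : List String) :
    all_tokens_match_py q e = q.all (fun qt => pvFoundA qt e) := by
  induction q with
  | nil => rfl
  | cons qt rest ih =>
    simp only [all_tokens_match_py, List.all_cons, ih]
    cases h : pvFoundA qt e <;> simp

-- ===== VERDICT (by name: the statement is the Claim_ definition above) =====
theorem all_tokens_match_py_spec : Claim_equal_all_tokens_match_py := by
  intro q e _
  show all_tokens_match_py q e = all_tokens_match_py_alt q e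
  rw [all_tokens_match_py_eq_all, all_tokens_match_py_alt]
  refine List.all_congr rfl fun qt => ?_
  rw [Bool.eq_iff_iff, pvFoundA_iff, PySem.Set.contains_iff, mem_prefixes_fold]
  simp
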